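-- pv_equiv track=rewrite | github.com/seth10/disco-zoo | discozoo.py | findPatterns
-- ===== SOURCE A (Python) =====
-- def findPatterns(animals):
--     grid = [[0]*5 for _ in range(5)]
--     for animal in animals:
--         for y in range(5 - len(animal) + 1):
--             for x in range(5 - len(animal[0]) + 1):
--                 for iy in range(len(animal)):
--                     for ix in range(len(animal[0])):
--                         if animal[iy][ix]:
--                             grid[y+iy][x+ix] += 1
--     return grid
-- ===== SOURCE B (Python) =====
-- def findPatterns(animals):
--     # Pointwise closed form: precompute each animal's truthy-cell mask once, then
--     # compute each output cell by a membership test instead of incrementing over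
--     # every placement position.
--     masks = []
--     for animal in animals:
--         h, w = len(animal), len(animal[0])
--         if h <= 5 and w <= 5:
--             cells = [(iy, ix) for iy in range(h) for ix in range(w) if animal[iy][ix]]
--             masks.append((h, w, cells))
--     return [[sum(1 for (h, w, cells) in masks for (iy, ix) in cells
--                  if iy <= Y <= iy + 5 - h and ix <= X <= ix + 5 - w)
--              for X in range(5)] for Y in range(5)]
-- ===== Notes on version B (the rewrite author's own statement) =====
-- stated objective: alternative
-- what changed: B precomputes each animal's truthy-cell mask once and computes every output cell by a closed-form membership test (iy<=Y<=iy+5-h, ix<=X<=ix+5-w) instead of A's four nested loops that increment grid cells for every placement position.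
import Mathlib
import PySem

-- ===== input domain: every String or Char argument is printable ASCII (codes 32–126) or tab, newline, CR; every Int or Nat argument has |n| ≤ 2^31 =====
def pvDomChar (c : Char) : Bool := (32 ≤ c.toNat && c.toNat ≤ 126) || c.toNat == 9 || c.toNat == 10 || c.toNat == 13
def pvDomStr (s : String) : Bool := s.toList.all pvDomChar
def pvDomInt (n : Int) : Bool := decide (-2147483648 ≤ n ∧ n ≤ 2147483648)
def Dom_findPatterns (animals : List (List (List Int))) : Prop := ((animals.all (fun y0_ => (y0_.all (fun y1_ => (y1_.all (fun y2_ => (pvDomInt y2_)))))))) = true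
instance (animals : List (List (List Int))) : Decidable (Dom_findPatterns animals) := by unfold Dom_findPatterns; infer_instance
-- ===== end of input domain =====

-- B replaces A's increment-over-every-placement nested loops by a per-animal truthy-cell
-- mask and a closed-form membership test per output cell (objective: alternative).

-- ===== PORT A =====

-- animal[iy][ix]: exact under Pre_ (indices in range there); defaults otherwise
def pvCell (a : List (List Int)) (iy ix : Int) : Int :=
  PySem.List.pyGetD (PySem.List.pyGetD a iy []) ix 0

-- grid[i][j] += 1: the loop bounds guarantee 0 ≤ i < 5 and 0 ≤ j < 5, where toNat is exact
def pvBump (g : List (List Int)) (i j : Int) : List (List Int) :=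
  g.modify i.toNat (fun row => row.modify j.toNat (· + 1))

def findPatterns (animals : List (List (List Int))) : List (List Int) :=
  animals.foldl (fun grid animal =>
    (PySem.List.pyRange 0 (5 - PySem.List.len animal + 1) 1).foldl (fun grid y =>
      (PySem.List.pyRange 0 (5 - PySem.List.len (PySem.List.pyGetD animal 0 []) + 1) 1).foldl (fun grid x =>
        (PySem.List.pyRange 0 (PySem.List.len animal) 1).foldl (fun grid iy =>
          (PySem.List.pyRange 0 (PySem.List.len (PySem.List.pyGetD animal 0 [])) 1).foldl (fun grid ix =>
            if pvCell animal iy ix ≠ 0 then pvBump grid (y + iy) (x + ix) else grid)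
            grid) grid) grid) grid)
    (List.replicate 5 (List.replicate 5 (0 : Int)))

-- ===== PORT B =====

-- [(iy, ix) for iy in range(h) for ix in range(w) if animal[iy][ix]]
def pvMaskCells (animal : List (List Int)) : List (Int × Int) :=
  (PySem.List.pyRange 0 (PySem.List.len animal) 1).flatMap (fun iy =>
    (PySem.List.pyRange 0 (PySem.List.len (PySem.List.pyGetD animal 0 [])) 1).filterMap (fun ix =>
      if pvCell animal iy ix ≠ 0 then some (iy, ix) else none))

def findPatterns_alt (animals : List (List (List Int))) : List (List Int) :=
  let masks := animals.foldl (fun ms animal =>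
    if PySem.List.len animal ≤ 5 ∧ PySem.List.len (PySem.List.pyGetD animal 0 []) ≤ 5 then
      ms ++ [(PySem.List.len animal, PySem.List.len (PySem.List.pyGetD animal 0 []), pvMaskCells animal)]
    else ms) []
  (PySem.List.pyRange 0 5 1).map (fun Y =>
    (PySem.List.pyRange 0 5 1).map (fun X =>
      (masks.map (fun m =>
        (m.2.2.map (fun c =>
          if c.1 ≤ Y ∧ Y ≤ c.1 + 5 - m.1 ∧ c.2 ≤ X ∧ X ≤ c.2 + 5 - m.2.1 then (1 : Int) else 0)).sum)).sum))

-- ===== PRECONDITION & SPEC =====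
-- Pre_ excludes exactly the inputs where Python A raises IndexError: an empty animal
-- (animal[0]), or an animal that fits the 5x5 grid with a row shorter than its first row.
def Pre_findPatterns (animals : List (List (List Int))) : Prop :=
  ∀ a ∈ animals, a ≠ [] ∧
    (a.length ≤ 5 → (a.getD 0 []).length ≤ 5 → ∀ r ∈ a, (a.getD 0 []).length ≤ r.length)
instance (animals : List (List (List Int))) : Decidable (Pre_findPatterns animals) := by
  unfold Pre_findPatterns; infer_instance

def pvWitness_findPatterns : List (List (List Int)) := [[[1, 0], [0, 1]], [[1]]]

def Spec_findPatterns (animals : List (List (List Int))) (out : List (List Int)) : Prop := out = findPatterns_alt animals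
instance (animals : List (List (List Int))) (out : List (List Int)) : Decidable (Spec_findPatterns animals out) := by unfold Spec_findPatterns; infer_instance

-- ===== CLAIM (what is proved, stated in full; the proofs are below) =====
def Claim_equal_findPatterns : Prop := ∀ (animals : List (List (List Int))), Dom_findPatterns animals → Pre_findPatterns animals → Spec_findPatterns animals (findPatterns animals)

-- ===== LEMMAS AND PROOFS =====

-- the 5×5 shape of A's grid, and its entry at (Y, X)
def pvShape (g : List (List Int)) : Prop := g.length = 5 ∧ ∀ r ∈ g, r.length = 5

def pvGet (g : List (List Int)) (Y X : Nat) : Int := (g.getD Y []).getD X 0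

-- B's per-animal contribution to output cell (Y, X)
def pvCB (a : List (List Int)) (Y X : Int) : Int :=
  if PySem.List.len a ≤ 5 ∧ PySem.List.len (PySem.List.pyGetD a 0 []) ≤ 5 then
    ((pvMaskCells a).map (fun c =>
      if c.1 ≤ Y ∧ Y ≤ c.1 + 5 - PySem.List.len a ∧
         c.2 ≤ X ∧ X ≤ c.2 + 5 - PySem.List.len (PySem.List.pyGetD a 0 []) then (1 : Int) else 0)).sum
  else 0

-- A's per-animal contribution to output cell (Y, X)
def pvCA (animal : List (List Int)) (Y X : Nat) : Int :=
  ((PySem.List.pyRange 0 (5 - PySem.List.len animal + 1) 1).map (fun y =>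
    ((PySem.List.pyRange 0 (5 - PySem.List.len (PySem.List.pyGetD animal 0 []) + 1) 1).map (fun x =>
      ((PySem.List.pyRange 0 (PySem.List.len animal) 1).map (fun iy =>
        ((PySem.List.pyRange 0 (PySem.List.len (PySem.List.pyGetD animal 0 [])) 1).map (fun ix =>
          if pvCell animal iy ix ≠ 0 then (if y + iy = (Y : Int) ∧ x + ix = (X : Int) then (1 : Int) else 0) else 0)).sum)).sum)).sum)).sum

lemma pvBump_spec (g : List (List Int)) (i j : Int) (hi : 0 ≤ i) (hi5 : i < 5)
    (hj : 0 ≤ j) (hj5 : j < 5) (hg : pvShape g) :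
    pvShape (pvBump g i j) ∧ ∀ Y X : Nat,
      pvGet (pvBump g i j) Y X = pvGet g Y X + (if i = (Y : Int) ∧ j = (X : Int) then 1 else 0) := by
  obtain ⟨hlen, hrows⟩ := hg
  constructor
  · constructor
    · simpa [pvBump, List.length_modify] using hlen
    · intro r hr
      rw [List.mem_iff_getElem] at hr
      obtain ⟨k, hk, hrk⟩ := hr
      have hk' : k < g.length := by simpa [pvBump, List.length_modify] using hk
      rw [show r = (pvBump g i j)[k]'hk from hrk.symm]
      simp only [pvBump, List.getElem_modify]
      split_ifs
      · rw [List.length_modify]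
        exact hrows _ (List.getElem_mem hk')
      · exact hrows _ (List.getElem_mem hk')
  · intro Y X
    simp only [pvGet, pvBump, List.getD_eq_getElem?_getD, List.getElem?_modify]
    by_cases hYl : Y < 5
    · rw [List.getElem?_eq_getElem (show Y < g.length by omega)]
      simp only [Option.map_eq_map, Option.map_some, Option.getD_some]
      have hrow : (g[Y]'(by omega)).length = 5 := hrows _ (List.getElem_mem (by omega))
      by_cases hiY : i.toNat = Y
      · rw [if_pos hiY]
        simp only [List.getElem?_modify]
        by_cases hXl : X < 5
        · rw [List.getElem?_eq_getElem (show X < (g[Y]'(by omega)).length by omega)]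
          simp only [Option.map_eq_map, Option.map_some, Option.getD_some]
          by_cases hjX : j.toNat = X
          · rw [if_pos hjX, if_pos (by omega)]
          · rw [if_neg hjX, if_neg (by omega), add_zero]
        · rw [List.getElem?_eq_none (show (g[Y]'(by omega)).length ≤ X by omega)]
          simp only [Option.map_eq_map, Option.map_none, Option.getD_none]
          rw [if_neg (by omega), add_zero]
      · rw [if_neg hiY, if_neg (by omega), add_zero]
    · rw [List.getElem?_eq_none (show g.length ≤ Y by omega)]
      simp only [Option.map_eq_map, Option.map_none, Option.getD_none, List.getElem?_nil]
      rw [if_neg (by omega), add_zero]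

lemma pvFold {α : Type} (Y X : Nat) (l : List α) (F : List (List Int) → α → List (List Int)) (c : α → Int)
    (hF : ∀ g a, a ∈ l → pvShape g → pvShape (F g a) ∧ pvGet (F g a) Y X = pvGet g Y X + c a) :
    ∀ g, pvShape g → pvShape (l.foldl F g) ∧ pvGet (l.foldl F g) Y X = pvGet g Y X + (l.map c).sum := by
  revert hF
  induction l with
  | nil => intro hF g hg; simpa using hg
  | cons a t ih =>
    intro hF g hg
    obtain ⟨hs, hv⟩ := hF g a (List.mem_cons_self) hg
    obtain ⟨hs2, hv2⟩ := ih (fun g b hb hgb => hF g b (List.mem_cons_of_mem _ hb) hgb) (F g a) hs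
    refine ⟨hs2, ?_⟩
    rw [List.foldl_cons, hv2, hv, List.map_cons, List.sum_cons]
    ring

lemma pvStepA (animal : List (List Int)) (Y X : Nat) :
    ∀ g, pvShape g →
      pvShape ((PySem.List.pyRange 0 (5 - PySem.List.len animal + 1) 1).foldl (fun grid y =>
        (PySem.List.pyRange 0 (5 - PySem.List.len (PySem.List.pyGetD animal 0 []) + 1) 1).foldl (fun grid x =>
          (PySem.List.pyRange 0 (PySem.List.len animal) 1).foldl (fun grid iy =>
            (PySem.List.pyRange 0 (PySem.List.len (PySem.List.pyGetD animal 0 [])) 1).foldl (fun grid ix =>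
              if pvCell animal iy ix ≠ 0 then pvBump grid (y + iy) (x + ix) else grid)
              grid) grid) grid) g) ∧
      pvGet ((PySem.List.pyRange 0 (5 - PySem.List.len animal + 1) 1).foldl (fun grid y =>
        (PySem.List.pyRange 0 (5 - PySem.List.len (PySem.List.pyGetD animal 0 []) + 1) 1).foldl (fun grid x =>
          (PySem.List.pyRange 0 (PySem.List.len animal) 1).foldl (fun grid iy =>
            (PySem.List.pyRange 0 (PySem.List.len (PySem.List.pyGetD animal 0 [])) 1).foldl (fun grid ix =>
              if pvCell animal iy ix ≠ 0 then pvBump grid (y + iy) (x + ix) else grid)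
              grid) grid) grid) g) Y X = pvGet g Y X + pvCA animal Y X := by
  intro g hg
  unfold pvCA
  refine pvFold Y X _ _ _ ?_ g hg
  intro g y hy hg
  rw [PySem.List.mem_pyRange_one] at hy
  refine pvFold Y X _ _ _ ?_ g hg
  intro g x hx hg
  rw [PySem.List.mem_pyRange_one] at hx
  refine pvFold Y X _ _ _ ?_ g hg
  intro g iy hiy hg
  rw [PySem.List.mem_pyRange_one] at hiy
  refine pvFold Y X _ _ _ ?_ g hg
  intro g ix hix hg
  rw [PySem.List.mem_pyRange_one] at hix
  by_cases hcell : pvCell animal iy ix ≠ 0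
  · rw [if_pos hcell, if_pos hcell]
    exact pvBump_spec g (y + iy) (x + ix) (by omega) (by omega) (by omega) (by omega) hg
      |>.imp id (fun h => by rw [h Y X])
  · rw [if_neg hcell, if_neg hcell]
    exact ⟨hg, by rw [add_zero]⟩

lemma pvA_char (animals : List (List (List Int))) (Y X : Nat) :
    pvShape (findPatterns animals) ∧
      pvGet (findPatterns animals) Y X = (animals.map (fun a => pvCA a Y X)).sum := by
  have hinit : pvShape (List.replicate 5 (List.replicate 5 (0 : Int))) := by
    constructor
    · simp
    · intro r hr
      simp [List.eq_of_mem_replicate hr]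
  have hinitget : pvGet (List.replicate 5 (List.replicate 5 (0 : Int))) Y X = 0 := by
    simp only [pvGet, List.getD_eq_getElem?_getD, List.getElem?_replicate]
    split_ifs <;> rcases X with _|_|_|_|_|X <;> simp
  obtain ⟨h1, h2⟩ := pvFold Y X animals _ (fun a => pvCA a Y X)
    (fun g a _ hg => pvStepA a Y X g hg) _ hinit
  exact ⟨h1, by rw [findPatterns, h2, hinitget, zero_add]⟩

lemma pvCnt (n a t : Nat) (c : Int) :
    (∑ k ∈ Finset.range n, if k + a = t then c else 0) = if a ≤ t ∧ t < a + n then c else 0 := by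
  induction n with
  | zero => rw [Finset.range_zero, Finset.sum_empty]; split_ifs <;> omega
  | succ n ih => rw [Finset.sum_range_succ, ih]; split_ifs <;> omega

lemma pvCore (H W Y X : Nat) (hH : H ≤ 5) (hW : W ≤ 5) (f : Nat → Nat → Int) :
    (∑ y ∈ Finset.range (6 - H), ∑ x ∈ Finset.range (6 - W), ∑ iy ∈ Finset.range H, ∑ ix ∈ Finset.range W,
       if y + iy = Y ∧ x + ix = X then f iy ix else 0)
    = ∑ iy ∈ Finset.range H, ∑ ix ∈ Finset.range W,
       if iy ≤ Y ∧ Y ≤ iy + 5 - H ∧ ix ≤ X ∧ X ≤ ix + 5 - W then f iy ix else 0 := by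
  have h1 : (∑ y ∈ Finset.range (6 - H), ∑ x ∈ Finset.range (6 - W), ∑ iy ∈ Finset.range H,
      ∑ ix ∈ Finset.range W, if y + iy = Y ∧ x + ix = X then f iy ix else 0)
      = ∑ iy ∈ Finset.range H, ∑ ix ∈ Finset.range W, ∑ y ∈ Finset.range (6 - H),
        ∑ x ∈ Finset.range (6 - W), if y + iy = Y ∧ x + ix = X then f iy ix else 0 := by
    calc (∑ y ∈ Finset.range (6 - H), ∑ x ∈ Finset.range (6 - W), ∑ iy ∈ Finset.range H,
        ∑ ix ∈ Finset.range W, if y + iy = Y ∧ x + ix = X then f iy ix else 0)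
        = ∑ y ∈ Finset.range (6 - H), ∑ iy ∈ Finset.range H, ∑ ix ∈ Finset.range W,
          ∑ x ∈ Finset.range (6 - W), if y + iy = Y ∧ x + ix = X then f iy ix else 0 :=
          Finset.sum_congr rfl (fun y _ => by
            rw [Finset.sum_comm]
            exact Finset.sum_congr rfl (fun iy _ => Finset.sum_comm))
      _ = ∑ iy ∈ Finset.range H, ∑ y ∈ Finset.range (6 - H), ∑ ix ∈ Finset.range W,
          ∑ x ∈ Finset.range (6 - W), if y + iy = Y ∧ x + ix = X then f iy ix else 0 :=
          Finset.sum_comm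
      _ = ∑ iy ∈ Finset.range H, ∑ ix ∈ Finset.range W, ∑ y ∈ Finset.range (6 - H),
          ∑ x ∈ Finset.range (6 - W), if y + iy = Y ∧ x + ix = X then f iy ix else 0 :=
          Finset.sum_congr rfl (fun iy _ => Finset.sum_comm)
  rw [h1]
  refine Finset.sum_congr rfl (fun iy hiy => Finset.sum_congr rfl (fun ix hix => ?_))
  rw [Finset.mem_range] at hiy hix
  have hx : ∀ y, (∑ x ∈ Finset.range (6 - W), if y + iy = Y ∧ x + ix = X then f iy ix else 0)
      = if y + iy = Y then (if ix ≤ X ∧ X < ix + (6 - W) then f iy ix else 0) else 0 := by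
    intro y
    by_cases hyY : y + iy = Y
    · simp only [hyY, true_and, if_true]
      exact pvCnt _ _ _ _
    · simp [hyY]
  rw [Finset.sum_congr rfl (fun y _ => hx y), pvCnt]
  split_ifs <;> first | rfl | (exfalso; omega)

lemma pvSumFlat {α β : Type} (l : List α) (f : α → List β) (F : β → Int) :
    ((l.flatMap f).map F).sum = (l.map (fun x => ((f x).map F).sum)).sum := by
  induction l with
  | nil => rfl
  | cons a t ih => simp [List.flatMap_cons, ih]

lemma pvSumFilterMap {α β : Type} (l : List α) (p : α → Prop) [DecidablePred p] (q : α → β) (F : β → Int) :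
    ((l.filterMap (fun x => if p x then some (q x) else none)).map F).sum
      = (l.map (fun x => if p x then F (q x) else 0)).sum := by
  induction l with
  | nil => rfl
  | cons a t ih => by_cases hp : p a <;> simp [hp, ih]

lemma pvSumFilter {α : Type} (l : List α) (p : α → Bool) (q : α → Int) :
    ((l.filter p).map q).sum = (l.map (fun x => if p x then q x else 0)).sum := by
  induction l with
  | nil => rfl
  | cons a t ih => by_cases hp : p a <;> simp [hp, ih]

lemma pvSumPyRange (n : Nat) (g : Int → Int) :
    ((PySem.List.pyRange 0 (n : Int) 1).map g).sum = ∑ k ∈ Finset.range n, g ↑k := by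
  rw [PySem.List.pyRange_one]
  simp only [sub_zero, Int.toNat_natCast, List.map_map]
  have he : (g ∘ fun k : Nat => (0 : Int) + ↑k) = fun k : Nat => g ↑k := by
    funext k; simp
  rw [he]
  rfl

lemma pvIfSwap (P Q : Prop) [Decidable P] [Decidable Q] (v : Int) :
    (if P then (if Q then v else 0) else 0) = if Q then (if P then v else 0) else 0 := by
  split_ifs <;> rfl

lemma pv_per_animal (a : List (List Int)) (Y X : Nat) :
    pvCA a Y X = pvCB a ↑Y ↑X := by
  have hlen : PySem.List.len a = (a.length : Int) := PySem.List.len_eq a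
  have hlen0 : PySem.List.len (PySem.List.pyGetD a 0 []) = ((a.getD 0 []).length : Int) := by
    rw [PySem.List.pyGetD_zero, PySem.List.len_eq]
  unfold pvCA pvCB pvMaskCells
  rw [hlen, hlen0]
  by_cases h5 : a.length ≤ 5
  · by_cases w5 : (a.getD 0 []).length ≤ 5
    · rw [if_pos (by constructor <;> [exact_mod_cast h5; exact_mod_cast w5])]
      rw [show (5 - (a.length : Int) + 1) = ((6 - a.length : Nat) : Int) from by omega,
          show (5 - ((a.getD 0 []).length : Int) + 1) = ((6 - (a.getD 0 []).length : Nat) : Int) from by omega]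
      rw [pvSumFlat]
      simp only [pvSumFilterMap, pvSumPyRange]
      calc (∑ y ∈ Finset.range (6 - a.length), ∑ x ∈ Finset.range (6 - (a.getD 0 []).length),
              ∑ iy ∈ Finset.range a.length, ∑ ix ∈ Finset.range (a.getD 0 []).length,
              if pvCell a ↑iy ↑ix ≠ 0 then
                (if (y : Int) + ↑iy = ↑Y ∧ (x : Int) + ↑ix = ↑X then (1 : Int) else 0) else 0)
          = ∑ y ∈ Finset.range (6 - a.length), ∑ x ∈ Finset.range (6 - (a.getD 0 []).length),
              ∑ iy ∈ Finset.range a.length, ∑ ix ∈ Finset.range (a.getD 0 []).length,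
              if y + iy = Y ∧ x + ix = X then
                (if pvCell a ↑iy ↑ix ≠ 0 then (1 : Int) else 0) else 0 := by
            refine Finset.sum_congr rfl fun y _ => Finset.sum_congr rfl fun x _ =>
              Finset.sum_congr rfl fun iy _ => Finset.sum_congr rfl fun ix _ => ?_
            rw [pvIfSwap]
            exact if_congr (by omega) rfl rfl
        _ = ∑ iy ∈ Finset.range a.length, ∑ ix ∈ Finset.range (a.getD 0 []).length,
              if iy ≤ Y ∧ Y ≤ iy + 5 - a.length ∧ ix ≤ X ∧ X ≤ ix + 5 - (a.getD 0 []).length then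
                (if pvCell a ↑iy ↑ix ≠ 0 then (1 : Int) else 0) else 0 := by
            exact pvCore a.length (a.getD 0 []).length Y X h5 w5 _
        _ = ∑ iy ∈ Finset.range a.length, ∑ ix ∈ Finset.range (a.getD 0 []).length,
              if pvCell a ↑iy ↑ix ≠ 0 then
                (if (iy : Int) ≤ ↑Y ∧ (Y : Int) ≤ ↑iy + 5 - ↑a.length ∧ (ix : Int) ≤ ↑X ∧
                   (X : Int) ≤ ↑ix + 5 - ↑(a.getD 0 []).length then (1 : Int) else 0) else 0 := by
            refine Finset.sum_congr rfl fun iy _ => Finset.sum_congr rfl fun ix _ => ?_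
            rw [pvIfSwap]
            exact if_congr Iff.rfl (if_congr (by omega) rfl rfl) rfl
    · rw [if_neg (by omega),
          PySem.List.pyRange_one_eq_nil (show (5 - ((a.getD 0 []).length : Int) + 1) ≤ 0 from by omega)]
      simp
  · rw [if_neg (by omega),
        PySem.List.pyRange_one_eq_nil (show (5 - (a.length : Int) + 1) ≤ 0 from by omega)]
    simp

lemma pv_main (animals : List (List (List Int))) : findPatterns animals = findPatterns_alt animals := by
  have hrange5 : PySem.List.pyRange 0 5 1 = [0, 1, 2, 3, 4] := by decide
  have hcast : ∀ (k : Nat), k < 5 → ∀ (hk : k < ([0, 1, 2, 3, 4] : List Int).length),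
      ([0, 1, 2, 3, 4] : List Int)[k]'hk = (k : Int) := by
    intro k hk5 hk
    interval_cases k <;> rfl
  have hA := pvA_char animals
  have hshape : pvShape (findPatterns animals) := (hA 0 0).1
  have hB : findPatterns_alt animals = ([0, 1, 2, 3, 4] : List Int).map (fun Y =>
      ([0, 1, 2, 3, 4] : List Int).map (fun X =>
        (animals.map (fun a => pvCB a Y X)).sum)) := by
    simp only [findPatterns_alt]
    rw [PySem.List.foldl_append_ite, List.nil_append, hrange5]
    refine List.map_congr_left fun Y _ => List.map_congr_left fun X _ => ?_
    rw [List.map_map, pvSumFilter]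
    refine congrArg List.sum (List.map_congr_left fun a _ => ?_)
    simp only [Function.comp, decide_eq_true_eq]
    rw [pvCB]
  rw [hB]
  apply List.ext_getElem
  · rw [hshape.1]; simp
  · intro Y hY1 hY2
    have hY5 : Y < 5 := by rw [hshape.1] at hY1; exact hY1
    apply List.ext_getElem
    · rw [hshape.2 _ (List.getElem_mem hY1)]
      simp only [List.getElem_map, List.length_map]
      rfl
    · intro X hX1 hX2
      have hX5 : X < 5 := by rw [hshape.2 _ (List.getElem_mem hY1)] at hX1; exact hX1
      calc ((findPatterns animals)[Y]'hY1)[X]'hX1 = pvGet (findPatterns animals) Y X := by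
            rw [pvGet, List.getD_eq_getElem _ _ hY1, List.getD_eq_getElem _ _ hX1]
        _ = (animals.map (fun a => pvCA a Y X)).sum := (hA Y X).2
        _ = (animals.map (fun a => pvCB a ↑Y ↑X)).sum :=
            congrArg List.sum (List.map_congr_left fun a _ => pv_per_animal a Y X)
        _ = _ := by
            simp only [List.getElem_map, hcast Y hY5, hcast X hX5]

-- ===== VERDICT (by name: the statement is the Claim_ definition above) =====
theorem findPatterns_spec : Claim_equal_findPatterns := by
  intro animals _ _
  unfold Spec_findPatterns
  exact pv_main animals
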